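-- pv_equiv track=rewrite | github.com/s-koide-dc/Design2Code | src/design_parser/design_inference.py | _replace_inference_block
-- ===== SOURCE A (Python) =====
-- def _replace_inference_block(content: str, block: str) -> str:
--     lines = content.splitlines()
--     out = []
--     in_block = False
--     for line in lines:
--         if line.strip() == "### Inference Metadata":
--             in_block = True
--             out.append(block.strip())
--             continue
--         if in_block:
--             if line.strip().startswith("## ") or line.strip().startswith("### "):
--                 in_block = False
--                 out.append(line)
--             else:
--                 continue
--         else:
--             out.append(line)
--     return "\n".join(out) + ("\n" if content.endswith("\n") else "")
-- ===== SOURCE B (Python) =====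
-- def _replace_inference_block(content: str, block: str) -> str:
--     lines = content.splitlines()
--     out = []
--     i = 0
--     n = len(lines)
--     while i < n:
--         line = lines[i]
--         if line.strip() == "### Inference Metadata":
--             out.append(block.strip())
--             i += 1
--             while i < n:
--                 s = lines[i].strip()
--                 if s.startswith("## ") or s.startswith("### "):
--                     break
--                 i += 1
--         else:
--             out.append(line)
--             i += 1
--     return "\n".join(out) + ("\n" if content.endswith("\n") else "")
-- ===== Notes on version B (the rewrite author's own statement) =====
-- stated objective: alternative
-- what changed: Replaces A's per-line in_block flag with an index-based outer scan that, at each metadata header, runs an inner skip loop consuming the whole block at once and leaves the terminating section header for the outer loop to re-handle.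
import Mathlib
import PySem

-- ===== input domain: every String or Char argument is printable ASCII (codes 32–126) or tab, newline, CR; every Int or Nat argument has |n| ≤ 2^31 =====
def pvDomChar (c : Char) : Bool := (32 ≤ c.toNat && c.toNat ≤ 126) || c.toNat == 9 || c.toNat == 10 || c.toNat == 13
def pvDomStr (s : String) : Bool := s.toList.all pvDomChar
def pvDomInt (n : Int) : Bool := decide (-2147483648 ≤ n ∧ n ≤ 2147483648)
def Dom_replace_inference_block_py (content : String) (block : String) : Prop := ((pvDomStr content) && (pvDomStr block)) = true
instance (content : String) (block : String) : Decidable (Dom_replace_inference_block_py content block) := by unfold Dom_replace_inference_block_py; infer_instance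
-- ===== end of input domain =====

-- B replaces A's per-line in_block flag by an index-style scan that, at each metadata
-- header, skips the whole following block in one inner dropWhile step (objective: alternative decomposition).

-- ===== PORT A =====
-- the for-loop of A, state = in_block, emitting the output list front-to-back
def pvALoop (b : String) : List String → Bool → List String
  | [], _ => []
  | l :: rest, inb =>
    if PySem.Str.strip l == "### Inference Metadata" then
      PySem.Str.strip b :: pvALoop b rest true
    else if inb then
      if PySem.Str.startswith (PySem.Str.strip l) "## " || PySem.Str.startswith (PySem.Str.strip l) "### " then
        l :: pvALoop b rest false
      else
        pvALoop b rest true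
    else
      l :: pvALoop b rest false

def replace_inference_block_py (content : String) (block : String) : String :=
  PySem.Str.join "\n" (pvALoop block (PySem.Str.splitlines content) false)
    ++ (if PySem.Str.endswith content "\n" then "\n" else "")

-- ===== PORT B =====
-- a line at which B's inner skipping loop stops (strip starts with '## ' or '### ')
def pvStopLine (l : String) : Bool :=
  PySem.Str.startswith (PySem.Str.strip l) "## " || PySem.Str.startswith (PySem.Str.strip l) "### "

-- termination helper for pvBLoop
theorem pvDropWhile_length_le (p : String → Bool) (l : List String) :
    (l.dropWhile p).length ≤ l.length := by
  induction l with
  | nil => simp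
  | cons a t ih =>
    by_cases h : p a = true
    · simp [List.dropWhile, h]; omega
    · simp [List.dropWhile, h]

-- B's outer while loop; the inner while loop is the dropWhile over the non-stop lines
def pvBLoop (b : String) : List String → List String
  | [] => []
  | l :: rest =>
    if PySem.Str.strip l == "### Inference Metadata" then
      PySem.Str.strip b :: pvBLoop b (rest.dropWhile (fun x => !pvStopLine x))
    else
      l :: pvBLoop b rest
termination_by ls => ls.length
decreasing_by
  · have := pvDropWhile_length_le (fun x => !pvStopLine x) rest; simp; omega
  · simp

def replace_inference_block_py_alt (content : String) (block : String) : String :=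
  PySem.Str.join "\n" (pvBLoop block (PySem.Str.splitlines content))
    ++ (if PySem.Str.endswith content "\n" then "\n" else "")

-- ===== PRECONDITION & SPEC =====
def Spec_replace_inference_block_py (content : String) (block : String) (out : String) : Prop := out = replace_inference_block_py_alt content block
instance (content : String) (block : String) (out : String) : Decidable (Spec_replace_inference_block_py content block out) := by unfold Spec_replace_inference_block_py; infer_instance

-- ===== CLAIM (what is proved, stated in full; the proofs are below) =====
def Claim_equal_replace_inference_block_py : Prop := ∀ (content : String) (block : String), Dom_replace_inference_block_py content block → Spec_replace_inference_block_py content block (replace_inference_block_py content block)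

-- ===== LEMMAS AND PROOFS =====

-- the metadata header is itself a stop line
theorem pvHeader_stop (l : String) (h : PySem.Str.strip l == "### Inference Metadata") :
    pvStopLine l = true := by
  unfold pvStopLine
  rw [eq_of_beq h]
  decide

-- A's in_block = true state equals the false state on the lines left after B's skip
theorem pvALoop_true_eq (b : String) (xs : List String) :
    pvALoop b xs true = pvALoop b (xs.dropWhile (fun x => !pvStopLine x)) false := by
  induction xs with
  | nil => simp [pvALoop]
  | cons l rest ih =>
    by_cases hh : PySem.Str.strip l == "### Inference Metadata"
    · have hs := pvHeader_stop l hh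
      simp [List.dropWhile, hs, pvALoop, hh]
    · by_cases hst : pvStopLine l = true
      · have hc := hst
        unfold pvStopLine at hc
        simp only [Bool.or_eq_true, PySem.Str.startswith_eq, PySem.Str.toList_strip] at hc
        rcases hc with h | h
        · have h' : PySem.Chars.startswith (PySem.Chars.strip l.toList) ['#','#',' '] = true := h
          simp [List.dropWhile, hst, pvALoop, hh, h']
        · have h' : PySem.Chars.startswith (PySem.Chars.strip l.toList) ['#','#','#',' '] = true := h
          simp [List.dropWhile, hst, pvALoop, hh, h']
      · have hc := hst
        unfold pvStopLine at hc
        simp only [Bool.not_eq_true] at hst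
        simp only [Bool.or_eq_false_iff, PySem.Str.startswith_eq, PySem.Str.toList_strip,
          Bool.not_eq_true] at hc
        have h1 : PySem.Chars.startswith (PySem.Chars.strip l.toList) ['#','#',' '] = false := hc.1
        have h2 : PySem.Chars.startswith (PySem.Chars.strip l.toList) ['#','#','#',' '] = false := hc.2
        simp [List.dropWhile, hst, pvALoop, hh, h1, h2, ih]

-- the two loops agree from the in_block = false start
theorem pvLoops_eq (b : String) (n : Nat) (xs : List String) (hn : xs.length ≤ n) :
    pvALoop b xs false = pvBLoop b xs := by
  induction n generalizing xs with
  | zero =>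
    have : xs = [] := List.eq_nil_of_length_eq_zero (Nat.le_zero.mp hn)
    subst this; simp [pvALoop, pvBLoop]
  | succ n ih =>
    cases xs with
    | nil => simp [pvALoop, pvBLoop]
    | cons l rest =>
      by_cases hh : PySem.Str.strip l == "### Inference Metadata"
      · have hlen : (rest.dropWhile (fun x => !pvStopLine x)).length ≤ n := by
          have := pvDropWhile_length_le (fun x => !pvStopLine x) rest
          simp at hn; omega
        simp [pvALoop, pvBLoop, hh, pvALoop_true_eq, ih _ hlen]
      · have hlen : rest.length ≤ n := by simp at hn; omega
        simp [pvALoop, pvBLoop, hh, ih _ hlen]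

-- ===== VERDICT (by name: the statement is the Claim_ definition above) =====
theorem replace_inference_block_py_spec : Claim_equal_replace_inference_block_py := by
  intro content block _
  unfold Spec_replace_inference_block_py replace_inference_block_py replace_inference_block_py_alt
  rw [pvLoops_eq block (PySem.Str.splitlines content).length _ (le_refl _)]
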